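-- pv_equiv track=rewrite | github.com/bidcoinauction/gsmgio_puzzle_kit | advanced_movement_solver.py | musical_scale_order
-- ===== SOURCE A (Python) =====
-- from typing import List, Tuple, Optional
--
-- def musical_scale_order(coords: List[Tuple[int, int]], scale: List[int] = [0, 2, 4, 5, 7, 9, 11]) -> List[int]:
--     """Order coordinates based on musical scale intervals."""
--     def musical_score(coord):
--         x, y = coord
--         # Use coordinates to determine scale position
--         total = x + y
--         scale_pos = total % len(scale)
--         return scale[scale_pos]
--
--     indexed_coords = [(i, coord) for i, coord in enumerate(coords)]
--     sorted_coords = sorted(indexed_coords, key=lambda x: musical_score(x[1]))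
--     return [i for i, _ in sorted_coords]
-- ===== SOURCE B (Python) =====
-- def musical_scale_order(coords, scale=[0, 2, 4, 5, 7, 9, 11]):
--     """Order coordinates based on musical scale intervals.
--
--     Bucket grouping: one pass files each index into the bucket of its scale
--     value, then the buckets are emitted in increasing key order; only the
--     (at most len(scale)) distinct keys are sorted, not the n items.
--     """
--     buckets = {}
--     for i, (x, y) in enumerate(coords):
--         buckets.setdefault(scale[(x + y) % len(scale)], []).append(i)
--     out = []
--     for k in sorted(buckets):
--         out += buckets[k]
--     return out
-- ===== Notes on version B (the rewrite author's own statement) =====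
-- stated objective: alternative
-- what changed: Replaces the stable sort of all n indexed coordinates by a one-pass bucket grouping keyed on the scale value, emitting buckets in increasing order of the (at most len(scale)) distinct keys.
import Mathlib
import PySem

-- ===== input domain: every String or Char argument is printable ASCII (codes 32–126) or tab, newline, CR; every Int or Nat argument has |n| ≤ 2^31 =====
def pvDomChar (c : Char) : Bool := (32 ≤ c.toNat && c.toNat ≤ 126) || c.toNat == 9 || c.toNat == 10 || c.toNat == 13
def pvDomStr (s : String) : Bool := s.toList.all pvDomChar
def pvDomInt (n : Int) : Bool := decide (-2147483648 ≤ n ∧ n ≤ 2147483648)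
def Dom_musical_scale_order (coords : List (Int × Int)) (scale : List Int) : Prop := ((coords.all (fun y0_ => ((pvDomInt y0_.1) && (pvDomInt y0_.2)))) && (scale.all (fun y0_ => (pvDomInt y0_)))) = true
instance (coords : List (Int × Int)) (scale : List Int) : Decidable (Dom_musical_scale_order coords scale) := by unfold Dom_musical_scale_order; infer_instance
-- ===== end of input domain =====

-- B replaces the full stable sort by one-pass bucket grouping on the scale value;
-- the proof shows the return values agree (no observable mutation in either program).

-- ===== PORT A =====
-- musical_score helper of A: scale[(x + y) % len(scale)] (always in range when scale is nonempty)
def pvScore (scale : List Int) (coord : Int × Int) : Int :=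
  (PySem.List.pyGet? scale (PySem.Int.mod (coord.1 + coord.2) (scale.length : Int))).getD 0

def musical_scale_order (coords : List (Int × Int)) (scale : List Int) : List Int :=
  let indexed_coords := PySem.List.enumerate coords
  let sorted_coords := PySem.List.sorted indexed_coords (fun x => pvScore scale x.2) false
  sorted_coords.map (fun p => p.1)

-- ===== PORT B =====
def musical_scale_order_alt (coords : List (Int × Int)) (scale : List Int) : List Int :=
  let buckets := (PySem.List.enumerate coords).foldl
    (fun d p => d.modify (pvScore scale p.2) [] (fun v => v ++ [p.1])) PySem.Dict.empty
  (PySem.List.sorted (PySem.Dict.keys buckets) (fun k => k) false).foldl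
    (fun out k => out ++ buckets.getD k []) []

-- ===== PRECONDITION & SPEC =====
-- Pre_ excludes exactly the inputs where Python A raises ZeroDivisionError: an empty scale with nonempty coords.
def Pre_musical_scale_order (coords : List (Int × Int)) (scale : List Int) : Prop :=
  scale ≠ [] ∨ coords = []
instance (coords : List (Int × Int)) (scale : List Int) : Decidable (Pre_musical_scale_order coords scale) := by unfold Pre_musical_scale_order; infer_instance
def pvWitness_musical_scale_order : (List (Int × Int)) × List Int := ([(1, 2), (0, 0), (3, -1)], [0, 2, 4])

def Spec_musical_scale_order (coords : List (Int × Int)) (scale : List Int) (out : List Int) : Prop := out = musical_scale_order_alt coords scale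
instance (coords : List (Int × Int)) (scale : List Int) (out : List Int) : Decidable (Spec_musical_scale_order coords scale out) := by unfold Spec_musical_scale_order; infer_instance

-- ===== CLAIM (what is proved, stated in full; the proofs are below) =====
def Claim_equal_musical_scale_order : Prop := ∀ (coords : List (Int × Int)) (scale : List Int), Dom_musical_scale_order coords scale → Pre_musical_scale_order coords scale → Spec_musical_scale_order coords scale (musical_scale_order coords scale)

-- ===== LEMMAS AND PROOFS =====

theorem pv_insertBy_pairwise {α : Type} (key : α → Int) (x : α) (ys : List α)
    (h : ys.Pairwise (fun a b => key a ≤ key b)) :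
    (PySem.List.insertBy (fun a b => decide (key a < key b)) x ys).Pairwise
      (fun a b => key a ≤ key b) := by
  induction ys with
  | nil => simp [PySem.List.insertBy]
  | cons y ys ih =>
    rcases List.pairwise_cons.mp h with ⟨hy, ht⟩
    by_cases hlt : key x < key y
    · simp [PySem.List.insertBy, hlt]
      refine ⟨⟨le_of_lt hlt, fun b hb => le_of_lt (lt_of_lt_of_le hlt (hy b hb))⟩, hy, ht⟩
    · simp [PySem.List.insertBy, hlt]
      refine ⟨?_, ih ht⟩
      intro b hb
      rcases (PySem.List.mem_insertBy _ _ _ _).mp hb with rfl | hb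
      · exact le_of_not_gt hlt
      · exact hy b hb

theorem pv_insertBy_filter {α : Type} (key : α → Int) (k : Int) (x : α) (ys : List α)
    (h : ys.Pairwise (fun a b => key a ≤ key b)) :
    (PySem.List.insertBy (fun a b => decide (key a < key b)) x ys).filter
        (fun z => key z == k) =
      if key x == k then ys.filter (fun z => key z == k) ++ [x]
      else ys.filter (fun z => key z == k) := by
  induction ys with
  | nil => by_cases hk : key x == k <;> simp [PySem.List.insertBy, hk, List.filter]
  | cons y ys ih =>
    rcases List.pairwise_cons.mp h with ⟨hy, ht⟩
    by_cases hlt : key x < key y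
    · -- result is x :: y :: ys; classes above key x are empty for k = key x
      simp only [PySem.List.insertBy, hlt, decide_true, if_true]
      by_cases hk : key x == k
      · have hkk : key x = k := by simpa using hk
        have hnone : (y :: ys).filter (fun z => key z == k) = [] := by
          apply List.filter_eq_nil_iff.mpr
          intro z hz
          have : key x < key z := by
            rcases List.mem_cons.mp hz with rfl | hz
            · exact hlt
            · exact lt_of_lt_of_le hlt (hy z hz)
          simp only [beq_iff_eq]
          omega
        have h1 : (key y == k) = false := by
          have := List.filter_eq_nil_iff.mp hnone y (by simp)
          simpa using this
        have h2 : List.filter (fun z => key z == k) ys = [] := by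
          apply List.filter_eq_nil_iff.mpr
          intro z hz
          exact List.filter_eq_nil_iff.mp hnone z (by simp [hz])
        simp [List.filter, hk, h1, h2]
      · simp [List.filter, hk]
    · simp only [PySem.List.insertBy, hlt, decide_false]
      by_cases hyk : key y == k <;> by_cases hk : key x == k <;>
        simp [List.filter, hyk, hk, ih ht]

theorem pv_foldl_insertBy_filter {α : Type} (key : α → Int) (k : Int) :
    ∀ (xs acc : List α), acc.Pairwise (fun a b => key a ≤ key b) →
      (xs.foldl (fun acc x => PySem.List.insertBy (fun a b => decide (key a < key b)) x acc) acc).filter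
          (fun z => key z == k) =
        acc.filter (fun z => key z == k) ++ xs.filter (fun z => key z == k) := by
  intro xs
  induction xs with
  | nil => intro acc _; simp
  | cons x xs ih =>
    intro acc hacc
    rw [List.foldl_cons, ih _ (pv_insertBy_pairwise key x acc hacc),
        pv_insertBy_filter key k x acc hacc]
    by_cases hk : key x == k <;> simp [List.filter, hk]

theorem pv_sorted_filter {α : Type} (key : α → Int) (k : Int) (xs : List α) :
    (PySem.List.sorted xs key false).filter (fun z => key z == k) =
      xs.filter (fun z => key z == k) := by
  rw [PySem.List.sorted_eq_foldl_insertBy]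
  simpa using pv_foldl_insertBy_filter key k xs [] (by simp)

-- a key-sorted list whose keys are all ≥ k starts with its k-class
theorem pv_filter_split {α : Type} (key : α → Int) (k : Int) :
    ∀ (l : List α), l.Pairwise (fun a b => key a ≤ key b) → (∀ p ∈ l, k ≤ key p) →
      l = l.filter (fun p => key p == k) ++ l.filter (fun p => !(key p == k)) := by
  intro l
  induction l with
  | nil => simp
  | cons p t ih =>
    intro hpw hge
    rcases List.pairwise_cons.mp hpw with ⟨hp, ht⟩
    by_cases hk : key p == k
    · rw [List.filter_cons, List.filter_cons]
      simp only [hk, Bool.not_true, if_true]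
      have := ih ht (fun q hq => hge q (List.mem_cons_of_mem _ hq))
      conv_lhs => rw [this]
      simp
    · have hkp : k < key p := lt_of_le_of_ne (hge p (by simp)) (Ne.symm (by simpa using hk))
      have hnil : (p :: t).filter (fun q => key q == k) = [] := by
        apply List.filter_eq_nil_iff.mpr
        intro q hq
        have : k < key q := by
          rcases List.mem_cons.mp hq with rfl | hq
          · exact hkp
          · exact lt_of_lt_of_le hkp (hp q hq)
        simp only [beq_iff_eq]; omega
      have hall : (p :: t).filter (fun q => !(key q == k)) = p :: t := by
        apply List.filter_eq_self.mpr
        intro q hq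
        have := List.filter_eq_nil_iff.mp hnil q hq
        simpa using this
      rw [hnil, hall]; rfl

theorem pv_flatMap_classes {α : Type} (key : α → Int) :
    ∀ (ks : List Int) (l : List α), ks.Pairwise (· < ·) →
      l.Pairwise (fun a b => key a ≤ key b) → (∀ p ∈ l, key p ∈ ks) →
      l = ks.flatMap (fun k => l.filter (fun p => key p == k)) := by
  intro ks
  induction ks with
  | nil =>
    intro l _ _ hmem
    cases l with
    | nil => simp
    | cons p t => exact absurd (hmem p (by simp)) (by simp)
  | cons k ks ih =>
    intro l hks hpw hmem
    rcases List.pairwise_cons.mp hks with ⟨hkmin, hks'⟩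
    have hge : ∀ p ∈ l, k ≤ key p := by
      intro p hp
      rcases List.mem_cons.mp (hmem p hp) with h | h
      · omega
      · exact le_of_lt (hkmin _ h)
    have hsplit := pv_filter_split key k l hpw hge
    have hrest : ∀ k' ∈ ks, l.filter (fun p => key p == k') =
        (l.filter (fun p => !(key p == k))).filter (fun p => key p == k') := by
      intro k' hk'
      have hkk' : k ≠ k' := ne_of_lt (hkmin _ hk')
      rw [List.filter_filter]
      apply List.filter_congr
      intro p _
      by_cases h : key p == k'
      · have : ¬ (key p == k) = true := by
          simp only [beq_iff_eq] at h ⊢; omega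
        simp [h, this]
      · simp [h]
    have ih' := ih (l.filter (fun p => !(key p == k))) hks'
      (List.Pairwise.filter _ hpw)
      (by
        intro p hp
        have hpl := List.mem_of_mem_filter hp
        have hne : ¬ (key p == k) = true := by simpa using List.of_mem_filter hp
        rcases List.mem_cons.mp (hmem p hpl) with h | h
        · exact absurd (by simpa using h) (by simpa using hne)
        · exact h)
    calc l = l.filter (fun p => key p == k) ++ l.filter (fun p => !(key p == k)) := hsplit
      _ = l.filter (fun p => key p == k) ++
            ks.flatMap (fun k' => (l.filter (fun p => !(key p == k))).filter (fun p => key p == k')) := by rw [← ih']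
      _ = (k :: ks).flatMap (fun k' => l.filter (fun p => key p == k')) := by
            rw [List.flatMap_cons]
            congr 1
            rw [List.flatMap, List.flatMap, List.map_congr_left (fun k' hk' => (hrest k' hk').symm)]

-- the bucket dict: lookup of one key class, and its key list
theorem t1 (coords : List (Int × Int)) (scale : List Int) (k : Int) :
    ((PySem.List.enumerate coords).foldl
      (fun d p => d.modify (pvScore scale p.2) [] (fun v => v ++ [p.1])) PySem.Dict.empty).getD k [] =
    ((PySem.List.enumerate coords).filter (fun p => pvScore scale p.2 == k)).map (fun p => p.1) := by
  have := PySem.Dict.getD_foldl_modify_append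
    ((PySem.List.enumerate coords).map (fun p => (pvScore scale p.2, p.1)))
    (PySem.Dict.empty) k
  rw [List.foldl_map] at this
  simp only [this, PySem.Dict.getD_empty, List.nil_append, List.filter_map]
  rw [List.map_map]
  rfl
theorem t2 (coords : List (Int × Int)) (scale : List Int) :
    ((PySem.List.enumerate coords).foldl
      (fun d p => d.modify (pvScore scale p.2) [] (fun v => v ++ [p.1])) PySem.Dict.empty).keys =
    PySem.Set.ofList ((PySem.List.enumerate coords).map (fun p => pvScore scale p.2)) := by
  have h := PySem.Dict.keys_foldl_modify_key (κ := Int) (ν := List Int)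
    (PySem.List.enumerate coords) (fun p => pvScore scale p.2) []
    (fun _ p => fun v => v ++ [p.1]) PySem.Dict.empty
  exact h.trans (by
    simp [PySem.Set.update_eq_append_filter, PySem.Dict.keys_empty, PySem.Set.contains])

theorem pv_main (coords : List (Int × Int)) (scale : List Int) :
    musical_scale_order coords scale = musical_scale_order_alt coords scale := by
  unfold musical_scale_order musical_scale_order_alt
  dsimp only
  rw [t2, PySem.List.foldl_append_eq_flatMap, List.nil_append]
  have hb : (fun k => ((PySem.List.enumerate coords).foldl
      (fun d p => d.modify (pvScore scale p.2) [] (fun v => v ++ [p.1])) PySem.Dict.empty).getD k [])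
      = fun k => ((PySem.List.sorted (PySem.List.enumerate coords) (fun x => pvScore scale x.2) false).filter
          (fun p => pvScore scale p.2 == k)).map (fun p => p.1) := by
    funext k
    rw [t1, pv_sorted_filter (fun p => pvScore scale p.2) k (PySem.List.enumerate coords)]
  rw [hb, ← List.map_flatMap]
  have hcl := pv_flatMap_classes (fun p : Int × (Int × Int) => pvScore scale p.2)
      (PySem.List.sorted (PySem.Set.ofList ((PySem.List.enumerate coords).map
        (fun p => pvScore scale p.2))) (fun k => k) false)
      (PySem.List.sorted (PySem.List.enumerate coords) (fun x => pvScore scale x.2) false)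
      (PySem.List.sorted_ofList_pairwise_lt _)
      (PySem.List.sorted_pairwise _ _)
      (by
        intro p hp
        rw [PySem.List.mem_sorted, PySem.Set.mem_ofList]
        exact List.mem_map_of_mem ((PySem.List.mem_sorted _ _ _ _).mp hp))
  rw [← hcl]

-- ===== VERDICT (by name: the statement is the Claim_ definition above) =====
theorem musical_scale_order_spec : Claim_equal_musical_scale_order := by
  intro coords scale _ _
  unfold Spec_musical_scale_order
  exact pv_main coords scale
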